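-- pv_equiv track=rewrite | github.com/123jimin/ckp | ckp/data_structure/segment_tree/binary_tree/complete_binary_tree.py | complete_binary_tree_sum_prefix
-- ===== SOURCE A (Python) =====
-- def complete_binary_tree_sum_prefix(tree: list, end: int):
--     """ Same as `complete_binary_tree_sum_range(tree, 0, end)`. """
--     L = len(tree)//2
--
--     if end <= 0: return 0
--     if end == L: return tree[1]
--     if end < L: end += L
--     else: end = L+L
--
--     res = 0
--     while end > 1:
--         if end & 1: res += tree[end-1]
--         end //= 2
--     return res
-- ===== SOURCE B (Python) =====
-- def complete_binary_tree_sum_prefix(tree: list, end: int):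
--     """ Same as `complete_binary_tree_sum_range(tree, 0, end)`.
--
--     Top-down recursive descent from the root (MSB-first along the bits of the
--     mapped position m), instead of the bottom-up LSB-first climb.
--     """
--     L = len(tree) // 2
--     if end <= 0 or L == 0:
--         return 0
--     if end == L:
--         return tree[1]
--     m = end + L if end < L else 2 * L
--
--     def go(node, j):
--         # node is the ancestor of position m with j+1 bits of m still unread
--         if j < 0:
--             return 0
--         if (m >> j) & 1:
--             return tree[2 * node] + go(2 * node + 1, j - 1)
--         return go(2 * node, j - 1)
--
--     return go(1, m.bit_length() - 2)
-- ===== Notes on version B (the rewrite author's own statement) =====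
-- stated objective: alternative
-- what changed: Replaces the bottom-up LSB-first while-loop climb (adding left siblings along the path from mapped position m to the root) with a top-down MSB-first recursive descent from the root driven by the bits of m; both read the same canonical-cover nodes.
import Mathlib
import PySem

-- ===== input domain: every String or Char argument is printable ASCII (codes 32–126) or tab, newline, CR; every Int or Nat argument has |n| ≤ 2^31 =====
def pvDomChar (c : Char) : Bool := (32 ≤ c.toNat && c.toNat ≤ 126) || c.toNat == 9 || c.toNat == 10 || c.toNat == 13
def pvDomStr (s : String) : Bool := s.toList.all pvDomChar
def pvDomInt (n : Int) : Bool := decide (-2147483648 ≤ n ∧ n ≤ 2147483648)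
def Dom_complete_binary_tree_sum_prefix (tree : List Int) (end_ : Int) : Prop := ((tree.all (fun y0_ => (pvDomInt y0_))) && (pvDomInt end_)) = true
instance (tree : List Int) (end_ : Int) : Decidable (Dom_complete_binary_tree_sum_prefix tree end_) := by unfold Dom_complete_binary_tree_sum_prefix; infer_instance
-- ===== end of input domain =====

-- B replaces A's bottom-up LSB-first while-loop with a top-down MSB-first recursive descent
-- from the root over the bits of the mapped position m (objective: alternative decomposition;
-- both read the same canonical-cover nodes).

-- ===== PORT A =====
-- A's `while end > 1` loop: `if end & 1: res += tree[end-1]` then `end //= 2`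
def pyALoop (tree : List Int) (e res : Int) : Int :=
  if 1 < e then
    pyALoop tree (PySem.Int.floordiv e 2)
      (if PySem.Int.band e 1 = 1 then res + PySem.List.pyGetD tree (e - 1) 0 else res)
  else res
termination_by e.toNat
decreasing_by
  have h2 : PySem.Int.floordiv e 2 = e / 2 := PySem.Int.floordiv_eq_ediv_of_pos (by omega)
  rw [h2]; omega

def complete_binary_tree_sum_prefix (tree : List Int) (end_ : Int) : Int :=
  let L := PySem.Int.floordiv (PySem.List.len tree) 2
  if end_ ≤ 0 then 0
  else if end_ = L then PySem.List.pyGetD tree 1 0  -- tree[1]: in range whenever this branch runs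
  else pyALoop tree (if end_ < L then end_ + L else L + L) 0

-- ===== PORT B =====
-- B's recursive helper `go(node, j)`; `m >> j` is `m >>> j.toNat` (exact: the j < 0 case
-- returns first, so the shift count is the nonnegative j), `& 1` is PySem.Int.band
def pyBGo (tree : List Int) (m : Int) (node : Int) (j : Int) : Int :=
  if j < 0 then 0
  else if PySem.Int.band (m >>> j.toNat) 1 = 1 then
    PySem.List.pyGetD tree (2 * node) 0 + pyBGo tree m (2 * node + 1) (j - 1)
  else pyBGo tree m (2 * node) (j - 1)
termination_by (j + 1).toNat
decreasing_by all_goals omega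

def complete_binary_tree_sum_prefix_alt (tree : List Int) (end_ : Int) : Int :=
  let L := PySem.Int.floordiv (PySem.List.len tree) 2
  if end_ ≤ 0 ∨ L = 0 then 0
  else if end_ = L then PySem.List.pyGetD tree 1 0  -- tree[1]: in range since L ≥ 1
  else
    let m := if end_ < L then end_ + L else 2 * L
    pyBGo tree m 1 ((PySem.Int.bitLength m : Int) - 2)  -- m.bit_length() is PySem.Int.bitLength

-- ===== PRECONDITION & SPEC =====
def Spec_complete_binary_tree_sum_prefix (tree : List Int) (end_ : Int) (out : Int) : Prop :=
  out = complete_binary_tree_sum_prefix_alt tree end_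
instance (tree : List Int) (end_ : Int) (out : Int) : Decidable (Spec_complete_binary_tree_sum_prefix tree end_ out) := by
  unfold Spec_complete_binary_tree_sum_prefix; infer_instance

-- ===== CLAIM (what is proved, stated in full; the proofs are below) =====
def Claim_equal_complete_binary_tree_sum_prefix : Prop := ∀ (tree : List Int) (end_ : Int), Dom_complete_binary_tree_sum_prefix tree end_ → Spec_complete_binary_tree_sum_prefix tree end_ (complete_binary_tree_sum_prefix tree end_)

-- ===== LEMMAS AND PROOFS =====

-- the term both programs add at path node v (odd v: the left sibling's stored value)
def pathTerm (tree : List Int) (v : Nat) : Int :=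
  if v % 2 = 1 then PySem.List.pyGetD tree ((v : Int) - 1) 0 else 0

-- sum of pathTerm over the ancestor chain n, n/2, …, down to (and excluding) 1
def sumPath (tree : List Int) (n : Nat) : Int :=
  if n ≤ 1 then 0 else pathTerm tree n + sumPath tree (n / 2)
decreasing_by omega

theorem pyALoop_eq (tree : List Int) : ∀ (n : Nat) (res : Int),
    pyALoop tree (n : Int) res = res + sumPath tree n := by
  intro n
  induction n using Nat.strong_induction_on with
  | _ n ih =>
    intro res
    by_cases h1 : 1 < n
    · have hfd : PySem.Int.floordiv (n : Int) 2 = ((n / 2 : Nat) : Int) := by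
        exact_mod_cast PySem.Int.floordiv_natCast n 2
      have hband : PySem.Int.band (n : Int) 1 = ((n % 2 : Nat) : Int) := by
        have := PySem.Int.band_natCast n 1
        simpa [Nat.and_one_is_mod] using this
      rw [pyALoop, if_pos (show (1 : Int) < (n : Int) by exact_mod_cast h1), hfd, hband,
        ih (n / 2) (by omega)]
      conv_rhs => rw [sumPath]
      rw [if_neg (show ¬ n ≤ 1 by omega), pathTerm]
      by_cases hodd : n % 2 = 1
      · rw [if_pos (show ((n % 2 : Nat) : Int) = 1 by exact_mod_cast hodd), if_pos hodd]; ring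
      · have hc : ¬ ((n % 2 : Nat) : Int) = 1 := by
          intro h; exact hodd (by exact_mod_cast h)
        rw [if_neg hc, if_neg hodd]; ring
    · rw [pyALoop, if_neg (show ¬ (1 : Int) < (n : Int) by exact_mod_cast h1)]
      conv_rhs => rw [sumPath]
      rw [if_pos (show n ≤ 1 by omega)]; ring

theorem pyBGo_inv (tree : List Int) (n : Nat) : ∀ (jj : Nat),
    jj + 1 ≤ PySem.Int.bitLength (n : Int) →
    pyBGo tree (n : Int) ((n / 2 ^ jj : Nat) : Int) ((jj : Int) - 1) + sumPath tree (n / 2 ^ jj)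
      = sumPath tree n := by
  intro jj
  induction jj with
  | zero => intro _; rw [pyBGo, if_pos (by norm_num)]; simp
  | succ jj ih =>
    intro hle
    have hn0 : (n : Int) ≠ 0 := by
      intro h
      rw [h, PySem.Int.bitLength_zero] at hle
      omega
    have hq2 : 2 ≤ n / 2 ^ jj := by
      have h1 : 2 ^ (PySem.Int.bitLength (n : Int) - 1) ≤ (n : Int).natAbs :=
        PySem.Int.two_pow_bitLength_le (n : Int) hn0
      have h2 : 2 ^ (jj + 1) ≤ 2 ^ (PySem.Int.bitLength (n : Int) - 1) :=
        Nat.pow_le_pow_right (by omega) (by omega)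
      have h3 : 2 ^ (jj + 1) ≤ n := by
        have : ((n : Int).natAbs) = n := Int.natAbs_natCast n
        omega
      have h4 := Nat.div_le_div_right (c := 2 ^ jj) h3
      have h5 : (2 : Nat) ^ jj * 2 / 2 ^ jj = 2 := Nat.mul_div_cancel_left 2 (Nat.two_pow_pos jj)
      rw [Nat.pow_succ, h5] at h4
      exact h4
    set q : Nat := n / 2 ^ jj with hq
    have hnode : n / 2 ^ (jj + 1) = q / 2 := by
      rw [hq, Nat.pow_succ, ← Nat.div_div_eq_div_mul]
    have hj0 : ¬ ((jj + 1 : Nat) : Int) - 1 < 0 := by push_cast; omega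
    have hsc : (((jj + 1 : Nat) : Int) - 1).toNat = jj := by omega
    have hsh : (n : Int) >>> jj = (q : Int) := by
      have h := Int.natCast_shiftRight n jj
      rw [Nat.shiftRight_eq_div_pow] at h
      omega
    have hband : PySem.Int.band ((q : Nat) : Int) 1 = ((q % 2 : Nat) : Int) := by
      simpa [Nat.and_one_is_mod] using PySem.Int.band_natCast q 1
    have hj1 : ((jj + 1 : Nat) : Int) - 1 - 1 = (jj : Int) - 1 := by push_cast; ring
    have ihq : pyBGo tree (n : Int) ((q : Nat) : Int) ((jj : Int) - 1)
        = sumPath tree n - sumPath tree q := by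
      have h := ih (by omega)
      linarith
    have hsq : sumPath tree q = pathTerm tree q + sumPath tree (q / 2) := by
      rw [sumPath, if_neg (by omega)]
    rw [hnode, pyBGo, if_neg hj0, hsc, hsh, hband, hj1]
    by_cases hodd : q % 2 = 1
    · have hcond : ((q % 2 : Nat) : Int) = 1 := by exact_mod_cast hodd
      have h2q1 : (2 : Int) * ((q / 2 : Nat) : Int) + 1 = ((q : Nat) : Int) := by omega
      have h2q : (2 : Int) * ((q / 2 : Nat) : Int) = ((q : Nat) : Int) - 1 := by omega
      rw [if_pos hcond, h2q1, h2q, ihq]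
      rw [pathTerm, if_pos hodd] at hsq
      linarith
    · have hcond : ¬ ((q % 2 : Nat) : Int) = 1 := by
        intro h; exact hodd (by exact_mod_cast h)
      have h2q : (2 : Int) * ((q / 2 : Nat) : Int) = ((q : Nat) : Int) := by omega
      rw [if_neg hcond, h2q, ihq]
      rw [pathTerm, if_neg hodd] at hsq
      linarith

theorem pyBGo_top (tree : List Int) (n : Nat) (hn : 2 ≤ n) :
    pyBGo tree (n : Int) 1 ((PySem.Int.bitLength (n : Int) : Int) - 2) = sumPath tree n := by
  have hn0 : (n : Int) ≠ 0 := by exact_mod_cast (by omega : n ≠ 0)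
  have hlow : 2 ^ (PySem.Int.bitLength (n : Int) - 1) ≤ n := by
    have h := PySem.Int.two_pow_bitLength_le (n : Int) hn0
    rwa [Int.natAbs_natCast] at h
  have hhigh : n < 2 ^ PySem.Int.bitLength (n : Int) := by
    have h := PySem.Int.lt_two_pow_bitLength (n : Int)
    rwa [Int.natAbs_natCast] at h
  set bl : Nat := PySem.Int.bitLength (n : Int) with hbl
  have hbl2 : 2 ≤ bl := by
    by_contra h
    have : bl ≤ 1 := by omega
    have : (2 : Nat) ^ bl ≤ 2 ^ 1 := Nat.pow_le_pow_right (by omega) this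
    simp at this
    omega
  have hdiv1 : n / 2 ^ (bl - 1) = 1 := by
    have h1 : 1 ≤ n / 2 ^ (bl - 1) := (Nat.le_div_iff_mul_le (Nat.two_pow_pos _)).mpr (by omega)
    have h2 : n / 2 ^ (bl - 1) < 2 := (Nat.div_lt_iff_lt_mul (Nat.two_pow_pos _)).mpr (by
      have : (2 : Nat) ^ bl = 2 ^ (bl - 1) * 2 := by
        rw [← Nat.pow_succ]; congr 1; omega
      omega)
    omega
  have hinv := pyBGo_inv tree n (bl - 1) (by omega)
  rw [hdiv1] at hinv
  have hcast : (((bl - 1 : Nat)) : Int) - 1 = (bl : Int) - 2 := by omega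
  have h1 : sumPath tree 1 = 0 := by rw [sumPath]; simp
  rw [hcast, h1] at hinv
  simp only [Nat.cast_one] at hinv
  linarith

-- floordiv of the length by 2, as a Nat cast
theorem len_half_cast (tree : List Int) :
    PySem.Int.floordiv (PySem.List.len tree) 2 = ((tree.length / 2 : Nat) : Int) := by
  rw [PySem.List.len_eq]
  exact_mod_cast PySem.Int.floordiv_natCast tree.length 2

-- ===== VERDICT (by name: the statement is the Claim_ definition above) =====
theorem complete_binary_tree_sum_prefix_spec : Claim_equal_complete_binary_tree_sum_prefix := by
  intro tree end_ _
  unfold Spec_complete_binary_tree_sum_prefix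
  simp only [complete_binary_tree_sum_prefix, complete_binary_tree_sum_prefix_alt, len_half_cast]
  set Ln : Nat := tree.length / 2 with hLn
  by_cases h0 : end_ ≤ 0
  · rw [if_pos h0, if_pos (Or.inl h0)]
  · by_cases hz : Ln = 0
    · rw [if_neg h0, if_pos (Or.inr (show ((Ln : Nat) : Int) = 0 by exact_mod_cast hz)),
        if_neg (show ¬ end_ = ((Ln : Nat) : Int) by omega),
        if_neg (show ¬ end_ < ((Ln : Nat) : Int) by omega), pyALoop,
        if_neg (show ¬ (1 : Int) < ((Ln : Nat) : Int) + ((Ln : Nat) : Int) by omega)]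
    · rw [if_neg h0, if_neg (show ¬ (end_ ≤ 0 ∨ ((Ln : Nat) : Int) = 0) by
        rintro (h | h)
        · exact h0 h
        · exact hz (by exact_mod_cast h))]
      by_cases heq : end_ = ((Ln : Nat) : Int)
      · rw [if_pos heq, if_pos heq]
      · rw [if_neg heq, if_neg heq]
        by_cases hlt : end_ < ((Ln : Nat) : Int)
        · rw [if_pos hlt, if_pos hlt]
          have hcast : (((end_ + ((Ln : Nat) : Int)).toNat : Nat) : Int)
              = end_ + ((Ln : Nat) : Int) := by omega
          have hn2 : 2 ≤ (end_ + ((Ln : Nat) : Int)).toNat := by omega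
          rw [← hcast, pyALoop_eq tree ((end_ + ((Ln : Nat) : Int)).toNat) 0,
            pyBGo_top tree ((end_ + ((Ln : Nat) : Int)).toNat) hn2]
          ring
        · rw [if_neg hlt, if_neg hlt]
          have hcastA : (((2 * Ln : Nat)) : Int) = ((Ln : Nat) : Int) + ((Ln : Nat) : Int) := by
            push_cast; ring
          have hcastB : (((2 * Ln : Nat)) : Int) = 2 * ((Ln : Nat) : Int) := by push_cast; ring
          have hn2 : 2 ≤ 2 * Ln := by omega
          rw [← hcastA, ← hcastB, pyALoop_eq tree (2 * Ln) 0, pyBGo_top tree (2 * Ln) hn2]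
          ring
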